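-- pv_equiv track=rewrite | github.com/sfneal/mysql-toolkit | mysql/toolkit/script/prepare.py | _get_next_occurrence
-- ===== SOURCE A (Python) =====
-- def _get_next_occurrence(haystack, offset, needles):
--     """
--     Find next occurence of one of the needles in the haystack
--
--     :return: tuple of (index, needle found)
--          or: None if no needle was found"""
--     # make map of first char to full needle (only works if all needles
--     # have different first characters)
--     firstcharmap = dict([(n[0], n) for n in needles])
--     firstchars = firstcharmap.keys()
--     while offset < len(haystack):
--         if haystack[offset] in firstchars:
--             possible_needle = firstcharmap[haystack[offset]]
--             if haystack[offset:offset + len(possible_needle)] == possible_needle: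
--                 return offset, possible_needle
--         offset += 1
--     return None
-- ===== SOURCE B (Python) =====
-- def _get_next_occurrence(haystack, offset, needles):
--     # same first-char map as the original (last needle wins per first character)
--     firstcharmap = dict([(n[0], n) for n in needles])
--     best = None
--     for needle in firstcharmap.values():
--         pos = haystack.find(needle, offset)
--         if pos != -1 and (best is None or pos < best[0]):
--             best = (pos, needle)
--     return best
-- ===== Notes on version B (the rewrite author's own statement) =====
-- stated objective: idiomatic
-- what changed: A's hand-rolled character-by-character scan (first-char map lookup plus slice comparison at every position) is replaced by one haystack.find(needle, offset) per distinct needle followed by taking the minimum position; the first-char map is kept so the last-needle-wins dedup is identical.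
-- outside the precondition, e.g. on _get_next_occurrence('ab', -2, ['a']): A returns (-2, 'a'), B returns (0, 'a'); on _get_next_occurrence('ab', -5, ['a']): A raises IndexError, B returns (0, 'a')
import Mathlib
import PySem

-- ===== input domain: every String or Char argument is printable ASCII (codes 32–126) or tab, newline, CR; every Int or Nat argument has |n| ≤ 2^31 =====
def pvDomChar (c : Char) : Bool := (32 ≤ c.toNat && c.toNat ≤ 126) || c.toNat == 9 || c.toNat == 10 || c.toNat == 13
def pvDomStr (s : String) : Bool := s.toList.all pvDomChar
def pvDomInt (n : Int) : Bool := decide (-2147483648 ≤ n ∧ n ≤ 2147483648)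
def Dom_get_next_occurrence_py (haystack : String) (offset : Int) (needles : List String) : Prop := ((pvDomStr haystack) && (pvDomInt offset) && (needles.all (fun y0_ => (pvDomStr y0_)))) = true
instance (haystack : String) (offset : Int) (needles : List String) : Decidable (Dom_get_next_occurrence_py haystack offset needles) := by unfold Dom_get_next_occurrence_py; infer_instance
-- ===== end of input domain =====

-- B replaces A's character-by-character scan (first-char map lookup + slice compare at every
-- position) by one haystack.find per distinct needle followed by a minimum — idiomatic use of
-- str.find; same first-char map, so the same last-needle-wins dedup.

-- ===== PORT A =====
-- n[0] (Pre_ guarantees every needle is nonempty, so pyGet? is `some` there)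
def pvA_firstchar (n : String) : Char := (PySem.Chars.pyGet? n.toList 0).getD ' '

-- firstcharmap = dict([(n[0], n) for n in needles])
def pvA_map (needles : List String) : PySem.Dict Char String :=
  PySem.Dict.ofList (needles.map (fun n => (pvA_firstchar n, n)))

-- while offset < len(haystack): …  (structural recursion on len(haystack) - offset)
def pvA_loop (hay : List Char) (fcm : PySem.Dict Char String) (offset : Int) : Option (Int × String) :=
  if _h : offset < (hay.length : Int) then
    -- haystack[offset] (in range under Pre_, where 0 ≤ offset < len)
    let c := (PySem.List.pyGet? hay offset).getD ' '
    if fcm.contains c then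
      let pn := fcm.getD c ""
      -- haystack[offset:offset + len(possible_needle)] == possible_needle
      if PySem.List.slice hay (some offset) (some (offset + (pn.toList.length : Int))) = pn.toList then
        some (offset, pn)
      else pvA_loop hay fcm (offset + 1)
    else pvA_loop hay fcm (offset + 1)
  else none
termination_by ((hay.length : Int) - offset).toNat
decreasing_by all_goals omega

def get_next_occurrence_py (haystack : String) (offset : Int) (needles : List String) : Option (Int × String) :=
  pvA_loop haystack.toList (pvA_map needles) offset

-- ===== PORT B =====
-- the same firstcharmap as A builds (same last-needle-wins dedup on the first character)
def pvB_map (needles : List String) : PySem.Dict Char String :=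
  PySem.Dict.ofList (needles.map (fun n => ((PySem.Chars.pyGet? n.toList 0).getD ' ', n)))

-- loop body: pos = haystack.find(needle, offset); keep (pos, needle) when pos != -1 and smaller
def pvB_step (hay : List Char) (offset : Int) (best : Option (Int × String)) (n : String) : Option (Int × String) :=
  let pos := PySem.Chars.findFrom hay n.toList offset none
  if pos = -1 then best
  else
    match best with
    | none => some (pos, n)
    | some pm => if pos < pm.1 then some (pos, n) else best

def get_next_occurrence_py_alt (haystack : String) (offset : Int) (needles : List String) : Option (Int × String) :=
  ((pvB_map needles).values).foldl (pvB_step haystack.toList offset) none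

-- ===== PRECONDITION & SPEC =====
-- Pre_ excludes needle lists containing the empty string, on which A raises IndexError while
-- building the first-char map, and negative offsets, where A raises IndexError whenever
-- offset < -len(haystack) and otherwise A's negative-index wraparound and B's str.find
-- clamping are two equally accidental readings of an out-of-domain search offset.
def Pre_get_next_occurrence_py (haystack : String) (offset : Int) (needles : List String) : Prop :=
  0 ≤ offset ∧ ∀ n ∈ needles, n ≠ ""
instance (haystack : String) (offset : Int) (needles : List String) : Decidable (Pre_get_next_occurrence_py haystack offset needles) := by unfold Pre_get_next_occurrence_py; infer_instance

def pvWitness_get_next_occurrence_py : String × Int × List String := ("scan ab;", 1, ["ab", ";"])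

def Spec_get_next_occurrence_py (haystack : String) (offset : Int) (needles : List String) (out : Option (Int × String)) : Prop := out = get_next_occurrence_py_alt haystack offset needles
instance (haystack : String) (offset : Int) (needles : List String) (out : Option (Int × String)) : Decidable (Spec_get_next_occurrence_py haystack offset needles out) := by unfold Spec_get_next_occurrence_py; infer_instance

-- ===== CLAIM (what is proved, stated in full; the proofs are below) =====
def Claim_equal_get_next_occurrence_py : Prop := ∀ (haystack : String) (offset : Int) (needles : List String), Dom_get_next_occurrence_py haystack offset needles → Pre_get_next_occurrence_py haystack offset needles → Spec_get_next_occurrence_py haystack offset needles (get_next_occurrence_py haystack offset needles)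

-- ===== LEMMAS AND PROOFS =====

-- the two ports build the same first-char dictionary
theorem pv_map_eq (needles : List String) : pvB_map needles = pvA_map needles := rfl

theorem pv_mem_items_foldl_insert {κ ν : Type} [BEq κ] [LawfulBEq κ] (ps : List (κ × ν)) (d : PySem.Dict κ ν)
    (p : κ × ν) (h : p ∈ (ps.foldl (fun acc q => acc.insert q.1 q.2) d).items) : p ∈ d.items ∨ p ∈ ps := by
  induction ps generalizing d with
  | nil => exact Or.inl h
  | cons q qs ih =>
    rcases ih _ h with h' | h'
    · rw [PySem.Dict.mem_items_insert] at h'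
      rcases h' with rfl | ⟨h', _⟩
      · exact Or.inr (by simp)
      · exact Or.inl h'
    · exact Or.inr (by simp [h'])

theorem pv_mem_items_ofList {κ ν : Type} [BEq κ] [LawfulBEq κ] (ps : List (κ × ν))
    (p : κ × ν) (h : p ∈ (PySem.Dict.ofList ps).items) : p ∈ ps := by
  rcases pv_mem_items_foldl_insert ps PySem.Dict.empty p h with h' | h'
  · simp [PySem.Dict.empty] at h'
  · exact h'

theorem pv_items_shape (needles : List String) (hne : ∀ n ∈ needles, n ≠ "")
    (p : Char × String) (hp : p ∈ (pvA_map needles).items) :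
    p.2.toList ≠ [] ∧ p.1 = p.2.toList.headD ' ' := by
  have hmem := pv_mem_items_ofList _ p hp
  rw [List.mem_map] at hmem
  obtain ⟨n, hn, rfl⟩ := hmem
  have hnn : n.toList ≠ [] := by simpa using hne n hn
  cases hl : n.toList with
  | nil => exact absurd hl hnn
  | cons c cs =>
    refine ⟨by simp [hl], ?_⟩
    simp [pvA_firstchar, hl, PySem.Chars.pyGet?]

theorem pv_items_key_inj {κ ν : Type} [BEq κ] [LawfulBEq κ] (d : PySem.Dict κ ν)
    (hnd : d.keys.Nodup) {k : κ} {v w : ν} (hv : (k, v) ∈ d.items) (hw : (k, w) ∈ d.items) : v = w := by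
  have h1 := PySem.Dict.get?_of_mem_items d hv hnd
  have h2 := PySem.Dict.get?_of_mem_items d hw hnd
  rw [h1] at h2
  exact Option.some.inj h2

theorem pv_mem_values {κ ν : Type} [BEq κ] (d : PySem.Dict κ ν) (v : ν) :
    v ∈ d.values ↔ ∃ k, (k, v) ∈ d.items := by
  constructor
  · intro h
    rw [PySem.Dict.values, List.mem_map] at h
    obtain ⟨p, hp, rfl⟩ := h
    exact ⟨p.1, hp⟩
  · rintro ⟨k, hk⟩
    rw [PySem.Dict.values, List.mem_map]
    exact ⟨(k, v), hk, rfl⟩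

theorem pv_fold_neg (hay : List Char) (off : Int) (l : List String) (b : Option (Int × String))
    (h : ∀ m ∈ l, PySem.Chars.findFrom hay m.toList off none = -1) :
    l.foldl (pvB_step hay off) b = b := by
  induction l generalizing b with
  | nil => rfl
  | cons x xs ih =>
    have hx := h x (by simp)
    simp only [List.foldl_cons, pvB_step, hx]
    exact ih b (fun m hm => h m (by simp [hm]))

theorem pv_fold_after (hay : List Char) (off : Int) (l : List String) (q : Int) (n : String)
    (hall : ∀ m ∈ l, PySem.Chars.findFrom hay m.toList off none = -1 ∨
      q < PySem.Chars.findFrom hay m.toList off none ∨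
      (m = n ∧ PySem.Chars.findFrom hay m.toList off none = q)) :
    l.foldl (pvB_step hay off) (some (q, n)) = some (q, n) := by
  induction l with
  | nil => rfl
  | cons x xs ih =>
    have hstep : pvB_step hay off (some (q, n)) x = some (q, n) := by
      rcases hall x (by simp) with hx | hx | ⟨rfl, hx⟩ <;>
        simp [pvB_step, hx] <;> omega
    rw [List.foldl_cons, hstep]
    exact ih (fun m hm => hall m (by simp [hm]))

theorem pv_fold_main (hay : List Char) (off : Int) (l : List String) (q : Int) (n : String)
    (b : Option (Int × String)) (hq : 0 ≤ q)
    (hall : ∀ m ∈ l, PySem.Chars.findFrom hay m.toList off none = -1 ∨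
      q < PySem.Chars.findFrom hay m.toList off none ∨
      (m = n ∧ PySem.Chars.findFrom hay m.toList off none = q))
    (hn : n ∈ l) (hposn : PySem.Chars.findFrom hay n.toList off none = q)
    (hb : b = none ∨ ∃ pm, b = some pm ∧ q < pm.1) :
    l.foldl (pvB_step hay off) b = some (q, n) := by
  induction l generalizing b with
  | nil => simp at hn
  | cons x xs ih =>
    have hq1 : ¬ (q = -1) := by omega
    by_cases hxn : x = n
    · subst hxn
      have hstep : pvB_step hay off b x = some (q, x) := by
        rcases hb with rfl | ⟨pm, rfl, hpm⟩
        · simp [pvB_step, hposn, hq1]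
        · simp [pvB_step, hposn, hq1, hpm]
      rw [List.foldl_cons, hstep]
      exact pv_fold_after hay off xs q x (fun m hm => hall m (by simp [hm]))
    · have hn' : n ∈ xs := by
        rcases List.mem_cons.mp hn with h | h
        · exact absurd h.symm hxn
        · exact h
      have htail : ∀ m ∈ xs, _ := fun m hm => hall m (by simp [hm])
      rw [List.foldl_cons]
      refine ih (pvB_step hay off b x) htail hn' ?_
      rcases hall x (by simp) with hx | hx | ⟨hxeq, _⟩
      · simpa [pvB_step, hx] using hb
      · have hxne : PySem.Chars.findFrom hay x.toList off none ≠ -1 := by omega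
        rcases hb with rfl | ⟨pm, rfl, hpm⟩
        · exact Or.inr ⟨(PySem.Chars.findFrom hay x.toList off none, x), by simp [pvB_step, hxne], hx⟩
        · by_cases hlt : PySem.Chars.findFrom hay x.toList off none < pm.1
          · exact Or.inr ⟨(PySem.Chars.findFrom hay x.toList off none, x), by simp [pvB_step, hxne, hlt], hx⟩
          · exact Or.inr ⟨pm, by simp [pvB_step, hxne, hlt], hpm⟩
      · exact absurd hxeq hxn

theorem pv_infix_drop_iff (sub l : List Char) (k : Nat) :
    sub <:+: l.drop k ↔ ∃ j, k ≤ j ∧ sub <+: l.drop j := by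
  constructor
  · rintro ⟨s, t, hst⟩
    refine ⟨k + s.length, by omega, ?_⟩
    have : l.drop (k + s.length) = (l.drop k).drop s.length := by rw [List.drop_drop]
    rw [this, ← hst]
    simp
  · rintro ⟨j, hkj, hpre⟩
    have : l.drop j = (l.drop k).drop (j - k) := by rw [List.drop_drop]; congr 1; omega
    rw [this] at hpre
    exact hpre.isInfix.trans (List.drop_suffix _ _).isInfix

theorem pv_findFrom_gt (hay sub : List Char) (p : Int) (h : (hay.length : Int) < p) :
    PySem.Chars.findFrom hay sub p none = -1 := by
  simp only [PySem.Chars.findFrom]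
  rw [if_neg (show ¬ p < 0 by omega), if_pos (show (hay.length : Int) < p from h)]

theorem pv_findFrom_match (hay sub : List Char) (pN : Nat) (hle : pN ≤ hay.length)
    (hpre : sub <+: hay.drop pN) :
    PySem.Chars.findFrom hay sub (pN : Int) none = (pN : Int) := by
  have hne : PySem.Chars.findFrom hay sub (pN : Int) none ≠ -1 := by
    rw [ne_eq, PySem.Chars.findFrom_natCast_eq_neg_one_iff hay sub pN hle]
    exact fun hcon => hcon ((pv_infix_drop_iff sub hay pN).mpr ⟨pN, le_refl _, hpre⟩)
  obtain ⟨h1, _h2, h3⟩ := PySem.Chars.findFrom_natCast_spec hay sub pN hle hne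
  by_contra hcon
  have hlt : pN < (PySem.Chars.findFrom hay sub (pN : Int) none).toNat := by omega
  exact h3 pN (le_refl _) hlt hpre

theorem pv_findFrom_succ (hay sub : List Char) (pN : Nat) (hlt : pN < hay.length)
    (hnp : ¬ sub <+: hay.drop pN) :
    PySem.Chars.findFrom hay sub (pN : Int) none = PySem.Chars.findFrom hay sub ((pN : Int) + 1) none := by
  have hle : pN ≤ hay.length := by omega
  have hle1 : pN + 1 ≤ hay.length := by omega
  have hcast : ((pN : Int) + 1) = ((pN + 1 : Nat) : Int) := by push_cast; ring
  rw [hcast]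
  by_cases hneg : PySem.Chars.findFrom hay sub (pN : Int) none = -1
  · rw [hneg]
    symm
    rw [PySem.Chars.findFrom_natCast_eq_neg_one_iff hay sub (pN+1) hle1]
    rw [PySem.Chars.findFrom_natCast_eq_neg_one_iff hay sub pN hle] at hneg
    intro hcon
    apply hneg
    rw [pv_infix_drop_iff] at hcon ⊢
    obtain ⟨j, hj, hp⟩ := hcon
    exact ⟨j, by omega, hp⟩
  · obtain ⟨h1, h2, h3⟩ := PySem.Chars.findFrom_natCast_spec hay sub pN hle hneg
    set pos := PySem.Chars.findFrom hay sub (pN : Int) none with hpos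
    have hposnn : 0 ≤ pos := le_trans (by omega) h1
    have hposne : pos.toNat ≠ pN := by
      intro hcon; rw [hcon] at h2; exact hnp h2
    have hposge : pN + 1 ≤ pos.toNat := by omega
    have hneg1 : PySem.Chars.findFrom hay sub ((pN+1 : Nat) : Int) none ≠ -1 := by
      rw [ne_eq, PySem.Chars.findFrom_natCast_eq_neg_one_iff hay sub (pN+1) hle1]
      intro hcon
      exact hcon ((pv_infix_drop_iff sub hay (pN+1)).mpr ⟨pos.toNat, hposge, h2⟩)
    obtain ⟨g1, g2, g3⟩ := PySem.Chars.findFrom_natCast_spec hay sub (pN+1) hle1 hneg1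
    set pos' := PySem.Chars.findFrom hay sub ((pN+1 : Nat) : Int) none with hpos'
    have hposnn' : 0 ≤ pos' := le_trans (by push_cast; omega) g1
    have hle'  : pos'.toNat ≤ pos.toNat := by
      by_contra hcon
      exact g3 pos.toNat hposge (by omega) h2
    have hge' : pos.toNat ≤ pos'.toNat := by
      by_contra hcon
      exact h3 pos'.toNat (by omega) (by omega) g2
    omega

theorem pv_B_none (hay : List Char) (d : PySem.Dict Char String)
    (hkey : ∀ pr ∈ d.items, pr.2.toList ≠ [] ∧ pr.1 = pr.2.toList.headD ' ')
    (p : Int) (hge : (hay.length : Int) ≤ p) :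
    d.values.foldl (pvB_step hay p) none = none := by
  apply pv_fold_neg
  intro m hm
  obtain ⟨k, hk⟩ := (pv_mem_values d m).mp hm
  have hmne : m.toList ≠ [] := (hkey _ hk).1
  rcases lt_or_eq_of_le hge with hlt | heq
  · exact pv_findFrom_gt hay m.toList p hlt
  · rw [← heq, PySem.Chars.findFrom_natCast_eq_neg_one_iff hay m.toList hay.length (le_refl _)]
    simp only [List.drop_length, List.infix_nil]
    exact hmne

theorem pv_main_gen (hay : List Char) (d : PySem.Dict Char String)
    (hkey : ∀ pr ∈ d.items, pr.2.toList ≠ [] ∧ pr.1 = pr.2.toList.headD ' ')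
    (hnd : d.keys.Nodup) :
    ∀ (fuel : Nat) (p : Int), 0 ≤ p → (hay.length : Int) - p ≤ fuel →
      pvA_loop hay d p = d.values.foldl (pvB_step hay p) none := by
  intro fuel
  induction fuel with
  | zero =>
    intro p _hp hle
    rw [pvA_loop, dif_neg (by omega), pv_B_none hay d hkey p (by omega)]
  | succ fuel ih =>
    intro p hp hle
    by_cases hplen : p < (hay.length : Int)
    case neg =>
      rw [pvA_loop, dif_neg hplen, pv_B_none hay d hkey p (by omega)]
    case pos =>
      have hpcast : (p.toNat : Int) = p := Int.toNat_of_nonneg hp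
      set pN := p.toNat with hpNdef
      have hpNlt : pN < hay.length := by omega
      have hget : PySem.List.pyGet? hay p = some hay[pN] := by
        rw [← hpcast]
        simp [PySem.List.pyGet?, PySem.List.pyIdx?, hpNlt]
      have hdropcons : hay.drop pN = hay[pN] :: hay.drop (pN + 1) := List.drop_eq_getElem_cons hpNlt
      -- key of a needle that matches at pN is hay[pN]
      have hkeyAt : ∀ pr ∈ d.items, pr.2.toList <+: hay.drop pN → pr.1 = hay[pN] := by
        intro pr hpr hpre
        obtain ⟨hne, hkeq⟩ := hkey _ hpr
        cases hl : pr.2.toList with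
        | nil => exact absurd hl hne
        | cons c cs =>
          rw [hl, hdropcons] at hpre
          rw [hkeq, hl]
          simpa using (List.cons_prefix_cons.mp hpre).1
      by_cases hM : ∃ pr ∈ d.items, pr.2.toList <+: hay.drop pN
      · obtain ⟨⟨k, nn⟩, hmem, hpre⟩ := hM
        have hk_eq : k = hay[pN] := hkeyAt _ hmem hpre
        have hck : d.contains hay[pN] = true := by
          rw [PySem.Dict.contains_eq_decide_mem_keys, decide_eq_true_eq, PySem.Dict.keys,
            List.mem_map]
          exact ⟨(k, nn), hmem, hk_eq⟩
        have hgd : d.getD hay[pN] "" = nn := by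
          rw [← hk_eq]
          exact PySem.Dict.getD_of_mem_items d hmem hnd ""
        have hslice : PySem.List.slice hay (some p) (some (p + (nn.toList.length : Int))) = nn.toList := by
          rw [← hpcast, PySem.List.slice_natCast_add]
          exact (List.prefix_iff_eq_take.mp hpre).symm
        rw [pvA_loop, dif_pos hplen]
        simp only [hget, Option.getD_some, hck, if_true, hgd, hslice]
        symm
        apply pv_fold_main hay p d.values p nn none hp ?_ ((pv_mem_values d nn).mpr ⟨k, hmem⟩)
          ?_ (Or.inl rfl)
        · -- hall
          intro m hm
          obtain ⟨km, hkm⟩ := (pv_mem_values d m).mp hm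
          by_cases hm1 : PySem.Chars.findFrom hay m.toList p none = -1
          · exact Or.inl hm1
          · right
            rw [← hpcast] at hm1 ⊢
            obtain ⟨s1, s2, s3⟩ :=
              PySem.Chars.findFrom_natCast_spec hay m.toList pN (le_of_lt hpNlt) hm1
            by_cases heq : PySem.Chars.findFrom hay m.toList (pN : Int) none = (pN : Int)
            · right
              have hmpre : m.toList <+: hay.drop pN := by
                have : (PySem.Chars.findFrom hay m.toList (pN : Int) none).toNat = pN := by
                  rw [heq]; omega
                rwa [this] at s2
              have hkm_eq : km = hay[pN] := hkeyAt _ hkm hmpre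
              have hmn : m = nn := pv_items_key_inj d hnd (hkm_eq ▸ hkm) (hk_eq ▸ hmem)
              exact ⟨hmn, heq⟩
            · left
              omega
        · rw [← hpcast]
          exact pv_findFrom_match hay nn.toList pN (le_of_lt hpNlt) hpre
      · -- no needle matches at position pN: step and shift the finds by one
        have hstep : pvA_loop hay d p = pvA_loop hay d (p + 1) := by
          rw [pvA_loop, dif_pos hplen]
          simp only [hget, Option.getD_some]
          by_cases hck : d.contains hay[pN] = true
          · have hkmem : hay[pN] ∈ d.keys := by
              rw [PySem.Dict.contains_eq_decide_mem_keys, decide_eq_true_eq] at hck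
              exact hck
            rw [PySem.Dict.keys, List.mem_map] at hkmem
            obtain ⟨⟨k, v⟩, hv, hkv⟩ := hkmem
            have hgd : d.getD hay[pN] "" = v := by
              rw [← hkv]
              exact PySem.Dict.getD_of_mem_items d hv hnd ""
            have hsl : PySem.List.slice hay (some p) (some (p + (v.toList.length : Int))) ≠ v.toList := by
              intro hcon
              rw [← hpcast, PySem.List.slice_natCast_add] at hcon
              exact hM ⟨(k, v), hv, List.prefix_iff_eq_take.mpr hcon.symm⟩
            rw [if_pos hck, hgd, if_neg hsl]
          · rw [if_neg hck]
        rw [hstep, ih (p + 1) (by omega) (by omega)]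
        apply PySem.List.foldl_congr_mem d.values (pvB_step hay (p + 1)) (pvB_step hay p) none
        intro acc m hm
        obtain ⟨km, hkm⟩ := (pv_mem_values d m).mp hm
        have hmpre : ¬ m.toList <+: hay.drop pN := fun hcon => hM ⟨(km, m), hkm, hcon⟩
        have hff := pv_findFrom_succ hay m.toList pN hpNlt hmpre
        rw [hpcast] at hff
        simp only [pvB_step, ← hff]

theorem pv_main (hay : List Char) (needles : List String) (hne : ∀ n ∈ needles, n ≠ "")
    (p : Int) (hp : 0 ≤ p) :
    pvA_loop hay (pvA_map needles) p =
      ((pvA_map needles).values).foldl (pvB_step hay p) none :=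
  pv_main_gen hay (pvA_map needles) (pv_items_shape needles hne)
    (PySem.Dict.nodup_keys_ofList _) hay.length p hp (by omega)

-- ===== VERDICT (by name: the statement is the Claim_ definition above) =====
theorem get_next_occurrence_py_spec : Claim_equal_get_next_occurrence_py := by
  intro haystack offset needles _hdom hpre
  unfold Spec_get_next_occurrence_py get_next_occurrence_py get_next_occurrence_py_alt
  rw [pv_map_eq]
  exact pv_main haystack.toList needles hpre.2 offset hpre.1
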